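-- pv_equiv track=rewrite | github.com/Natalka-Pro/algorithms | 4H. Decoding Maya.py | non_equal
-- ===== SOURCE A (Python) =====
-- from itertools import chain
--
-- def non_equal(d1, d2):
--     non_equal_num = 0
--
--     for i in chain(range(ord("A"), ord("Z") + 1), range(ord("a"), ord("z") + 1)):
--
--         letter = chr(i)
--
--         if ((letter in d1) + (letter in d2)) % 2 == 1:
--             non_equal_num += 1
--         elif letter in d1:
--             if d1[letter] != d2[letter]:
--                 non_equal_num += 1
--
--     return non_equal_num
-- ===== SOURCE B (Python) =====
-- def non_equal(d1, d2):
--     s = object()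
--     keys = {k for k in set(d1) | set(d2)
--             if len(k) == 1 and ("A" <= k <= "Z" or "a" <= k <= "z")}
--     return sum(1 for k in keys if d1.get(k, s) != d2.get(k, s))
-- ===== Notes on version B (the rewrite author's own statement) =====
-- stated objective: idiomatic
-- what changed: B replaces A's fixed 52-letter alphabet scan with presence-parity branching by building the set of single-letter keys actually present in either dict and counting the keys where sentinel-defaulted gets differ.
import Mathlib
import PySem

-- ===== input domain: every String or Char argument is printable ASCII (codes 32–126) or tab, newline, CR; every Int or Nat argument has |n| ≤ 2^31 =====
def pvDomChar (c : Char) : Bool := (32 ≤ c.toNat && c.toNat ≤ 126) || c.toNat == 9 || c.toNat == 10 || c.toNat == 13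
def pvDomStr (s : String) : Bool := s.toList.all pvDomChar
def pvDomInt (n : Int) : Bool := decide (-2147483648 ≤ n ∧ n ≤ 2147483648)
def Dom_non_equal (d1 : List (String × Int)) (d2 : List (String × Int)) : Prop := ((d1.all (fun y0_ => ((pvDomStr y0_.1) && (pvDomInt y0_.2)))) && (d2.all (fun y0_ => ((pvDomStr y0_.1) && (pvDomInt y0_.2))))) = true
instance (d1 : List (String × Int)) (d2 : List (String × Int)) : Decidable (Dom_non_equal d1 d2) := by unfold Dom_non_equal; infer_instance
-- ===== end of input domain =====

-- B scans only the letter keys actually present in either dict (a set) instead of A's fixed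
-- 52-letter alphabet scan with presence-parity branching; objective: idiomatic/alternative.

-- ===== PORT A =====
-- literal transliteration of A: for i in chain(range(65,91), range(97,123)), with the dicts as
-- association lists (first-match lookup); the elif branch compares d1[letter] with d2[letter],
-- where both lookups are guaranteed present, rendered as comparison of the two lookups.
def non_equal (d1 : List (String × Int)) (d2 : List (String × Int)) : Int :=
  (PySem.List.pyRange 65 91 1 ++ PySem.List.pyRange 97 123 1).foldl
    (fun acc i =>
      let letter : String := String.ofList [Char.ofNat i.toNat]
      if PySem.Int.mod ((if (List.lookup letter d1).isSome then (1 : Int) else 0) +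
          (if (List.lookup letter d2).isSome then (1 : Int) else 0)) 2 = 1 then acc + 1
      else if (List.lookup letter d1).isSome then
        if List.lookup letter d1 ≠ List.lookup letter d2 then acc + 1 else acc
      else acc) 0

-- ===== PORT B =====
-- B-side helper: k is a single ASCII letter ('A'..'Z' or 'a'..'z')
def pvIsLetterKey (k : String) : Bool :=
  match k.toList with
  | [c] => (65 ≤ c.toNat && c.toNat ≤ 90) || (97 ≤ c.toNat && c.toNat ≤ 122)
  | _ => false

-- literal transliteration of Source B: letter keys present in either dict (a set), then the
-- sentinel-guarded sum 'sum(1 for k in keys if d1.get(k,s) != d2.get(k,s))' — get with a fresh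
-- sentinel is exactly the Option-valued first-match lookup, and the 0/1 sum is countP.
def non_equal_alt (d1 : List (String × Int)) (d2 : List (String × Int)) : Int :=
  let keys := (PySem.Set.ofList (d1.map Prod.fst ++ d2.map Prod.fst)).filter pvIsLetterKey
  ((keys.countP (fun k => List.lookup k d1 != List.lookup k d2) : Nat) : Int)

-- ===== PRECONDITION & SPEC =====
def Spec_non_equal (d1 : List (String × Int)) (d2 : List (String × Int)) (out : Int) : Prop := out = non_equal_alt d1 d2
instance (d1 : List (String × Int)) (d2 : List (String × Int)) (out : Int) : Decidable (Spec_non_equal d1 d2 out) := by unfold Spec_non_equal; infer_instance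

-- ===== CLAIM (what is proved, stated in full; the proofs are below) =====
def Claim_equal_non_equal : Prop := ∀ (d1 : List (String × Int)) (d2 : List (String × Int)), Dom_non_equal d1 d2 → Spec_non_equal d1 d2 (non_equal d1 d2)

-- ===== LEMMAS AND PROOFS =====

-- the 52 one-character letter strings A iterates over
def pvL52 : List String :=
  (PySem.List.pyRange 65 91 1 ++ PySem.List.pyRange 97 123 1).map
    (fun i => String.ofList [Char.ofNat i.toNat])

theorem pvLookup_eq_none {β : Type} (l : List (String × β)) (k : String)
    (h : k ∉ l.map Prod.fst) : List.lookup k l = none := by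
  induction l with
  | nil => rfl
  | cons a t ih =>
    simp only [List.map_cons, List.mem_cons, not_or] at h
    simp only [List.lookup]
    rw [show (k == a.1) = false from beq_eq_false_iff_ne.mpr h.1]
    exact ih h.2

theorem pv_body_eq (d1 d2 : List (String × Int)) (acc : Int) (letter : String) :
    (if PySem.Int.mod ((if (List.lookup letter d1).isSome then (1 : Int) else 0) +
          (if (List.lookup letter d2).isSome then (1 : Int) else 0)) 2 = 1 then acc + 1
      else if (List.lookup letter d1).isSome then
        if List.lookup letter d1 ≠ List.lookup letter d2 then acc + 1 else acc
      else acc)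
    = acc + (if (List.lookup letter d1 != List.lookup letter d2) = true then 1 else 0) := by
  rcases h1 : List.lookup letter d1 with _ | v1 <;> rcases h2 : List.lookup letter d2 with _ | v2 <;>
    simp [bne_iff_ne, PySem.Int.mod]
  by_cases hv : v1 = v2 <;> simp [hv]

theorem pv_foldl_eq (d1 d2 : List (String × Int)) (L : List Int) (acc : Int) :
    (L.foldl (fun acc i =>
      let letter : String := String.ofList [Char.ofNat i.toNat]
      if PySem.Int.mod ((if (List.lookup letter d1).isSome then (1 : Int) else 0) +
          (if (List.lookup letter d2).isSome then (1 : Int) else 0)) 2 = 1 then acc + 1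
      else if (List.lookup letter d1).isSome then
        if List.lookup letter d1 ≠ List.lookup letter d2 then acc + 1 else acc
      else acc) acc)
    = acc + (((L.map (fun i => String.ofList [Char.ofNat i.toNat])).countP
        (fun k => List.lookup k d1 != List.lookup k d2) : Nat) : Int) := by
  induction L generalizing acc with
  | nil => simp
  | cons x t ih =>
    simp only [List.foldl_cons, List.map_cons, List.countP_cons]
    rw [ih, pv_body_eq]
    by_cases h : (List.lookup (String.ofList [Char.ofNat x.toNat]) d1 !=
        List.lookup (String.ofList [Char.ofNat x.toNat]) d2) = true <;>
      simp [h] <;> omega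

theorem pv_mem_L52_iff (x : String) : x ∈ pvL52 ↔ pvIsLetterKey x = true := by
  constructor
  · intro hx
    have hall : pvL52.all pvIsLetterKey = true := by decide
    exact List.all_eq_true.mp hall x hx
  · intro hx
    unfold pvIsLetterKey at hx
    rcases hc : x.toList with _ | ⟨c, rest⟩
    · rw [hc] at hx; simp at hx
    · rcases rest with _ | _
      · rw [hc] at hx
        simp only [Bool.or_eq_true, Bool.and_eq_true, decide_eq_true_eq] at hx
        have hxeq : x = String.ofList [c] := by rw [← hc, String.ofList_toList]
        unfold pvL52
        rw [List.mem_map]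
        refine ⟨(c.toNat : Int), ?_, ?_⟩
        · rw [List.mem_append, PySem.List.mem_pyRange_one, PySem.List.mem_pyRange_one]
          omega
        · rw [hxeq]
          congr 1
          simp only [Int.toNat_natCast]
          exact congrArg (fun c => [c]) (Char.ofNat_toNat c)
      · rw [hc] at hx; simp at hx

theorem pv_filter_mem (d1 d2 : List (String × Int)) (x : String) :
    (x ∈ pvL52.filter (fun k => List.lookup k d1 != List.lookup k d2)) ↔
    (x ∈ ((PySem.Set.ofList (d1.map Prod.fst ++ d2.map Prod.fst)).filter pvIsLetterKey).filter
        (fun k => List.lookup k d1 != List.lookup k d2)) := by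
  simp only [List.mem_filter, PySem.Set.mem_ofList, List.mem_append]
  constructor
  · rintro ⟨hmem, hdiff⟩
    refine ⟨⟨?_, (pv_mem_L52_iff x).mp hmem⟩, hdiff⟩
    by_contra hno
    rw [not_or] at hno
    rw [pvLookup_eq_none d1 x hno.1, pvLookup_eq_none d2 x hno.2] at hdiff
    simp at hdiff
  · rintro ⟨⟨_, hlet⟩, hdiff⟩
    exact ⟨(pv_mem_L52_iff x).mpr hlet, hdiff⟩

-- ===== VERDICT (by name: the statement is the Claim_ definition above) =====
theorem non_equal_spec : Claim_equal_non_equal := by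
  intro d1 d2 _
  unfold Spec_non_equal non_equal non_equal_alt
  rw [pv_foldl_eq d1 d2]
  have hL : ((PySem.List.pyRange 65 91 1 ++ PySem.List.pyRange 97 123 1).map
      (fun i => String.ofList [Char.ofNat i.toNat])) = pvL52 := rfl
  rw [hL, zero_add]
  congr 1
  rw [List.countP_eq_length_filter, List.countP_eq_length_filter]
  have hnodupL : (pvL52.filter (fun k => List.lookup k d1 != List.lookup k d2)).Nodup := by
    have : pvL52.Nodup := by decide
    exact this.filter _
  have hnodupK : (((PySem.Set.ofList (d1.map Prod.fst ++ d2.map Prod.fst)).filter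
      pvIsLetterKey).filter (fun k => List.lookup k d1 != List.lookup k d2)).Nodup := by
    have : ((PySem.Set.ofList (d1.map Prod.fst ++ d2.map Prod.fst)).filter pvIsLetterKey).Nodup :=
      (PySem.List.nodup_dedup _).filter _
    exact this.filter _
  exact ((List.perm_ext_iff_of_nodup hnodupL hnodupK).mpr (pv_filter_mem d1 d2)).length_eq
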